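-- pv_equiv track=rewrite | github.com/matuspintek-boop/ib111 | 05/p6_colours.py | nearest_colour
-- ===== SOURCE A (Python) =====
-- Colour = tuple[int, int, int]
--
-- def abs(num: int) -> int:
--
--     if num <= 0:
--         return - num
--     else:
--         return num
--
-- def get_distance(color_1: tuple[int, int, int],
--                  color_2: tuple[int, int, int]) -> int:
--     x1, y1, z1 = color_1
--     x2, y2, z2 = color_2
--
--     return abs(x2-x1) + abs(y2-y1) + abs(z2-z1)
--
-- def nearest_colour(names: dict[str, Colour],
--                    colour: Colour) -> set[str]:
--
--     minimum: int = 1000000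
--
--     data: dict[str, int] = {}
--
--     output: set[str] = set()
--
--     for name, color in names.items():
--         distance: int = get_distance(color, colour)
--
--         minimum = min(minimum, distance)
--
--         data[name] = distance
--
--     for name, distance in data.items():
--
--         if distance == minimum:
--             output.add(name)
--
--     return output
-- ===== SOURCE B (Python) =====
-- def abs(num: int) -> int:
--     if num <= 0:
--         return - num
--     else:
--         return num
--
-- def get_distance(color_1, color_2):
--     x1, y1, z1 = color_1
--     x2, y2, z2 = color_2
--     return abs(x2-x1) + abs(y2-y1) + abs(z2-z1)
--
-- def nearest_colour(names, colour):
--     minimum = 1000000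
--     output = set()
--     for name, color in names.items():
--         d = get_distance(color, colour)
--         if d < minimum:
--             minimum = d
--             output = {name}
--         elif d == minimum:
--             output.add(name)
--     return output
-- ===== Notes on version B (the rewrite author's own statement) =====
-- stated objective: simpler
-- what changed: Single pass keeping only the running minimum and the set of names achieving it (reset on strictly smaller, add on equal), instead of building a full name->distance dict and then re-scanning it in a second loop.
import Mathlib
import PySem

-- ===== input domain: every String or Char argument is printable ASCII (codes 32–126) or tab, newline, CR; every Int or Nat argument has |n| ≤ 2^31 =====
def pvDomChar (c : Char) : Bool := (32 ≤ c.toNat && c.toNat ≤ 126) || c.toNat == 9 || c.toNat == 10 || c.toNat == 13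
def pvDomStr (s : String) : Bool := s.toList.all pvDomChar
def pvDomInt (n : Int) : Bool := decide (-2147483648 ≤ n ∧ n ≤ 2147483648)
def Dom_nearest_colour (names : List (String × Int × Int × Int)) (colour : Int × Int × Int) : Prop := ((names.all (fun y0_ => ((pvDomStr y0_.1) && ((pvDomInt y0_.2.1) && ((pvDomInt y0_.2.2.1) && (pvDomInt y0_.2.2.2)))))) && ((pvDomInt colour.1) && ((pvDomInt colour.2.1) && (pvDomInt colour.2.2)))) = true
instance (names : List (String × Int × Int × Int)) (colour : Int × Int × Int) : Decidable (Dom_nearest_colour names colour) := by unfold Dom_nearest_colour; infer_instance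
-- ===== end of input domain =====

-- B replaces A's build-dict-then-filter two-pass with a single pass that keeps only the
-- running minimum distance and the set of names achieving it (objective: simpler).

-- ===== PORT A =====
-- helpers shared by both sources (abs / get_distance are identical in Source A and Source B)
def pyAbs (num : Int) : Int := if num ≤ 0 then -num else num

def get_distance (color_1 color_2 : Int × Int × Int) : Int :=
  pyAbs (color_2.1 - color_1.1) + pyAbs (color_2.2.1 - color_1.2.1) + pyAbs (color_2.2.2 - color_1.2.2)

-- loop body of A's first pass: update the running minimum and data[name] = distance
def stepA1 (colour : Int × Int × Int) (st : Int × PySem.Dict String Int)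
    (e : String × Int × Int × Int) : Int × PySem.Dict String Int :=
  let distance := get_distance e.2 colour
  (min st.1 distance, st.2.insert e.1 distance)

-- loop body of A's second pass: if distance == minimum: output.add(name)
def stepA2 (minimum : Int) (output : PySem.Set String) (p : String × Int) : PySem.Set String :=
  if p.2 == minimum then output.add p.1 else output

def nearest_colour (names : List (String × Int × Int × Int)) (colour : Int × Int × Int) : List String :=
  let st := names.foldl (stepA1 colour) (1000000, PySem.Dict.empty)
  st.2.items.foldl (stepA2 st.1) PySem.Set.empty

-- ===== PORT B =====
-- loop body of B: reset on strictly smaller distance, add on equal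
def stepB (colour : Int × Int × Int) (st : Int × PySem.Set String)
    (e : String × Int × Int × Int) : Int × PySem.Set String :=
  let d := get_distance e.2 colour
  if d < st.1 then (d, PySem.Set.ofList [e.1])
  else if d == st.1 then (st.1, st.2.add e.1)
  else st

def nearest_colour_alt (names : List (String × Int × Int × Int)) (colour : Int × Int × Int) : List String :=
  (names.foldl (stepB colour) (1000000, PySem.Set.empty)).2

-- ===== PRECONDITION & SPEC =====
-- Pre_ excludes association lists with duplicate name keys: A's parameter is a Python
-- dict, which cannot contain duplicate keys (a list argument would raise AttributeError).
def Pre_nearest_colour (names : List (String × Int × Int × Int)) (colour : Int × Int × Int) : Prop :=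
  (names.map (·.1)).Nodup
instance (names : List (String × Int × Int × Int)) (colour : Int × Int × Int) : Decidable (Pre_nearest_colour names colour) := by unfold Pre_nearest_colour; infer_instance
def pvWitness_nearest_colour : (List (String × Int × Int × Int)) × (Int × Int × Int) :=
  ([("red", 255, 0, 0), ("blue", 0, 0, 255)], (10, 0, 0))

def Spec_nearest_colour (names : List (String × Int × Int × Int)) (colour : Int × Int × Int) (out : List String) : Prop := out = nearest_colour_alt names colour
instance (names : List (String × Int × Int × Int)) (colour : Int × Int × Int) (out : List String) : Decidable (Spec_nearest_colour names colour out) := by unfold Spec_nearest_colour; infer_instance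

-- ===== CLAIM (what is proved, stated in full; the proofs are below) =====
def Claim_equal_nearest_colour : Prop := ∀ (names : List (String × Int × Int × Int)) (colour : Int × Int × Int), Dom_nearest_colour names colour → Pre_nearest_colour names colour → Spec_nearest_colour names colour (nearest_colour names colour)

-- ===== LEMMAS AND PROOFS =====

-- distance of an entry, abbreviation used only by the proofs
def distOf (colour : Int × Int × Int) (e : String × Int × Int × Int) : Int :=
  get_distance e.2 colour

-- the running minimum over a list, from a start value
def runMin (colour : Int × Int × Int) (l : List (String × Int × Int × Int)) (a : Int) : Int :=
  l.foldl (fun acc e => min acc (distOf colour e)) a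

lemma runMin_le (colour : Int × Int × Int) (l : List (String × Int × Int × Int)) (a : Int) :
    runMin colour l a ≤ a := by
  induction l generalizing a with
  | nil => simp [runMin]
  | cons e t ih =>
      calc runMin colour (e :: t) a = runMin colour t (min a (distOf colour e)) := rfl
        _ ≤ min a (distOf colour e) := ih _
        _ ≤ a := min_le_left _ _

-- A's first loop splits into the min-fold and the dict-fold
lemma foldA_split (colour : Int × Int × Int) (l : List (String × Int × Int × Int))
    (a : Int) (d : PySem.Dict String Int) :
    l.foldl (stepA1 colour) (a, d)
      = (runMin colour l a, l.foldl (fun d e => d.insert e.1 (get_distance e.2 colour)) d) := by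
  induction l generalizing a d with
  | nil => rfl
  | cons e t ih =>
      rw [List.foldl_cons, List.foldl_cons]
      exact ih _ _

-- A's second loop: over distinct keys none of which is already in the output set,
-- the Set.add always appends, so the loop is a filter-then-project
lemma foldA_filter (M : Int) (l : List (String × Int)) (out : PySem.Set String)
    (hout : ∀ p ∈ l, p.1 ∉ out) (hnd : (l.map (·.1)).Nodup) :
    l.foldl (stepA2 M) out = out ++ (l.filter (fun p => p.2 == M)).map (·.1) := by
  induction l generalizing out with
  | nil => simp
  | cons p t ih =>
      simp only [List.map_cons, List.nodup_cons] at hnd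
      rw [List.foldl_cons]
      by_cases h : p.2 = M
      · have hadd : stepA2 M out p = out ++ [p.1] := by
          rw [stepA2, if_pos (by simp [h]),
            PySem.Set.add_of_not_mem (hout p List.mem_cons_self)]
        rw [hadd, ih (out ++ [p.1])
              (by intro q hq hmem
                  rcases List.mem_append.mp hmem with hin | hin
                  · exact hout q (List.mem_cons_of_mem _ hq) hin
                  · exact hnd.1 ((List.mem_singleton.mp hin) ▸ List.mem_map_of_mem hq))
              hnd.2]
        simp [List.filter_cons, h]
      · have hskip : stepA2 M out p = out := by
          rw [stepA2, if_neg (by simp [h])]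
        rw [hskip, ih out (fun q hq => hout q (List.mem_cons_of_mem _ hq)) hnd.2]
        simp [List.filter_cons, h]

-- B's loop invariant: the final pair is (final minimum, names achieving it); the carried
-- set survives only if the minimum never drops below the incoming value a
lemma foldB_char (colour : Int × Int × Int) (l : List (String × Int × Int × Int))
    (a : Int) (s : PySem.Set String)
    (hs : ∀ e ∈ l, e.1 ∉ s) (hnd : (l.map (·.1)).Nodup) :
    l.foldl (stepB colour) (a, s)
      = (runMin colour l a,
         (if runMin colour l a < a then ([] : List String) else s)
           ++ (l.filter (fun e => distOf colour e == runMin colour l a)).map (·.1)) := by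
  induction l generalizing a s with
  | nil => simp [runMin]
  | cons e t ih =>
      simp only [List.map_cons, List.nodup_cons] at hnd
      have hM : runMin colour (e :: t) a = runMin colour t (min a (distOf colour e)) := rfl
      have hMle : runMin colour t (min a (distOf colour e)) ≤ min a (distOf colour e) :=
        runMin_le _ _ _
      set d := distOf colour e with hd
      have hge : get_distance e.2 colour = d := rfl
      rw [List.foldl_cons]
      rcases lt_trichotomy d a with hlt | heq | hgt
      · -- reset branch
        have hmin : min a d = d := min_eq_right hlt.le
        rw [hmin] at hM hMle
        have hstep : stepB colour (a, s) e = (d, PySem.Set.ofList [e.1]) := by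
          rw [stepB]; simp only [hge]
          rw [if_pos hlt]
        rw [hstep, ih d (PySem.Set.ofList [e.1])
              (by intro q hq hmem
                  rw [PySem.Set.mem_ofList, List.mem_singleton] at hmem
                  exact hnd.1 (hmem ▸ List.mem_map_of_mem hq))
              hnd.2, hM]
        have hMlt : runMin colour t d < a := lt_of_le_of_lt hMle hlt
        by_cases hcase : runMin colour t d < d
        · have hne : ¬ (d == runMin colour t d) = true := by simp; omega
          simp [hMlt, hcase, List.filter_cons, ← hd, hne]
        · have hDeq : runMin colour t d = d := le_antisymm hMle (not_lt.mp hcase)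
          have heq2 : (d == runMin colour t d) = true := by simp [hDeq]
          simp [hMlt, hcase, List.filter_cons, ← hd, heq2, PySem.Set.ofList]
      · -- equal branch: append e.1
        have hmin : min a d = a := by omega
        rw [hmin] at hM hMle
        have hstep : stepB colour (a, s) e = (a, s ++ [e.1]) := by
          rw [stepB]; simp only [hge]
          rw [if_neg (by omega), if_pos (by simp [heq]),
            PySem.Set.add_of_not_mem (hs e List.mem_cons_self)]
        rw [hstep, ih a (s ++ [e.1])
              (by intro q hq hmem
                  rcases List.mem_append.mp hmem with hin | hin
                  · exact hs q (List.mem_cons_of_mem _ hq) hin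
                  · exact hnd.1 ((List.mem_singleton.mp hin) ▸ List.mem_map_of_mem hq))
              hnd.2, hM]
        by_cases hcase : runMin colour t a < a
        · have hne : ¬ (d == runMin colour t a) = true := by simp; omega
          simp [hcase, List.filter_cons, ← hd, hne]
        · have hAeq : runMin colour t a = a := le_antisymm hMle (not_lt.mp hcase)
          have heq2 : (d == runMin colour t a) = true := by simp [hAeq, heq]
          simp [hcase, List.filter_cons, ← hd, heq2]
      · -- greater branch: state unchanged
        have hmin : min a d = a := min_eq_left hgt.le
        rw [hmin] at hM hMle
        have hstep : stepB colour (a, s) e = (a, s) := by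
          rw [stepB]; simp only [hge]
          rw [if_neg (by omega), if_neg (by simp; omega)]
        rw [hstep, ih a s (fun q hq => hs q (List.mem_cons_of_mem _ hq)) hnd.2, hM]
        have hne : ¬ (d == runMin colour t a) = true := by simp; omega
        simp [List.filter_cons, ← hd, hne]

-- both sides reduce to: project the names whose distance equals the global minimum
theorem nearest_colour_eq (names : List (String × Int × Int × Int)) (colour : Int × Int × Int)
    (hnd : (names.map (·.1)).Nodup) :
    nearest_colour names colour = nearest_colour_alt names colour := by
  unfold nearest_colour nearest_colour_alt
  rw [foldA_split, foldB_char colour names 1000000 PySem.Set.empty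
        (by intro q _ h; simp [PySem.Set.empty] at h) hnd]
  have hitems : (names.foldl (fun d e => d.insert e.1 (get_distance e.2 colour))
      PySem.Dict.empty).items = names.map (fun e => (e.1, get_distance e.2 colour)) := by
    have := PySem.Dict.items_foldl_insert_fresh (l := names) (d := PySem.Dict.empty)
      (k := fun e => e.1) (v := fun e => get_distance e.2 colour)
      (by intro a _; exact PySem.Dict.contains_empty _) hnd
    simpa using this
  simp only [hitems]
  rw [foldA_filter (runMin colour names 1000000)
        (names.map (fun e => (e.1, get_distance e.2 colour))) PySem.Set.empty
        (by intro q _ h; simp [PySem.Set.empty] at h)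
        (by simpa using hnd)]
  simp [List.filter_map, Function.comp_def, distOf, PySem.Set.empty]

-- ===== VERDICT (by name: the statement is the Claim_ definition above) =====
theorem nearest_colour_spec : Claim_equal_nearest_colour := by
  intro names colour _ hpre
  unfold Spec_nearest_colour
  exact nearest_colour_eq names colour hpre
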